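-- pv_equiv track=rewrite | github.com/Mihirkothari04/AI-Newsroom-Team | src/agents/writerbot/writerbot.py | _extract_headline_and_content
-- ===== SOURCE A (Python) =====
-- def _extract_headline_and_content(generated_text: str) -> tuple[str, str]:
--     """
--     Extract headline and content from generated text.
--
--     Args:
--         generated_text: Text generated by LLM.
--
--     Returns:
--         Tuple of (headline, content).
--     """
--     lines = generated_text.strip().split('\n')
--
--     # Find the headline (usually the first non-empty line)
--     headline = "Untitled Article"
--     content_start = 0
--
--     for i, line in enumerate(lines):
--         if line.strip():
--             headline = line.strip()
--             content_start = i + 1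
--             break
--
--     # Join the rest as content
--     content = '\n'.join(lines[content_start:]).strip()
--
--     return headline, content
-- ===== SOURCE B (Python) =====
-- def _extract_headline_and_content(generated_text: str) -> tuple[str, str]:
--     stripped = generated_text.strip()
--     if not stripped:
--         return "Untitled Article", ""
--     head, _, tail = stripped.partition('\n')
--     return head.strip(), tail.strip()
-- ===== Notes on version B (the rewrite author's own statement) =====
-- stated objective: simpler
-- what changed: Replaces A's split-into-lines plus enumerate loop searching for the first non-empty line (tracking content_start) by a single partition of the stripped text at its first newline, since after strip the first line is always non-empty.
import Mathlib
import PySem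

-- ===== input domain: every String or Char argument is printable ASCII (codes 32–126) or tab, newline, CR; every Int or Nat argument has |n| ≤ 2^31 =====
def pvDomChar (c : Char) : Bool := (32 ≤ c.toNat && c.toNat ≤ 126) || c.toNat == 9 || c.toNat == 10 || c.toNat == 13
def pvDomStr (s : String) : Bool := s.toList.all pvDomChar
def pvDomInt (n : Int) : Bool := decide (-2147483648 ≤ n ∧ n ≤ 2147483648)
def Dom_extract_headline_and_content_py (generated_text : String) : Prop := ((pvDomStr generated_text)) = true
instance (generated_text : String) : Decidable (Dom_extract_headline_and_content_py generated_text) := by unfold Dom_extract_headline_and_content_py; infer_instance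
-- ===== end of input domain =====

-- B replaces A's enumerate loop (searching for the first non-empty line) by a single
-- partition at the first newline of the stripped text; objective: simpler.

-- ===== PORT A =====
-- the 'for i, line in enumerate(lines): if line.strip(): … break' loop, carrying i;
-- base case = the loop finishing without break (headline default, content_start 0)
def pvFindHeadA : List (List Char) → Nat → (List Char × Nat)
  | [], _ => ("Untitled Article".toList, 0)
  | l :: ls, i =>
      if PySem.Chars.strip l ≠ [] then (PySem.Chars.strip l, i + 1)
      else pvFindHeadA ls (i + 1)

def extract_headline_and_content_py (generated_text : String) : String × String :=
  let lines := PySem.Chars.splitOn (PySem.Chars.strip generated_text.toList) ['\n']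
  let hc := pvFindHeadA lines 0
  -- lines[content_start:] : content_start is a Nat ≤ len, so the Python slice is List.drop
  (String.ofList hc.1,
   String.ofList (PySem.Chars.strip (PySem.Chars.join ['\n'] (lines.drop hc.2))))

-- ===== PORT B =====
-- hand port of str.partition('\n') (PySem has no partition): split at the FIRST '\n';
-- if absent, (s, "") — exact for a one-character separator
def pvPartNl : List Char → List Char × List Char
  | [] => ([], [])
  | c :: r => if c = '\n' then ([], r) else
      let p := pvPartNl r
      (c :: p.1, p.2)

def extract_headline_and_content_py_alt (generated_text : String) : String × String :=
  let t := PySem.Chars.strip generated_text.toList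
  if t = [] then ("Untitled Article", "")
  else
    let p := pvPartNl t
    (String.ofList (PySem.Chars.strip p.1), String.ofList (PySem.Chars.strip p.2))

-- ===== PRECONDITION & SPEC =====
def Spec_extract_headline_and_content_py (generated_text : String) (out : String × String) : Prop := out = extract_headline_and_content_py_alt generated_text
instance (generated_text : String) (out : String × String) : Decidable (Spec_extract_headline_and_content_py generated_text out) := by unfold Spec_extract_headline_and_content_py; infer_instance

-- ===== CLAIM (what is proved, stated in full; the proofs are below) =====
def Claim_equal_extract_headline_and_content_py : Prop := ∀ (generated_text : String), Dom_extract_headline_and_content_py generated_text → Spec_extract_headline_and_content_py generated_text (extract_headline_and_content_py generated_text)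

-- ===== LEMMAS AND PROOFS =====

-- clean structural version of splitOn (c :: ·) at '\n'
def pvSplitNl : List Char → List (List Char)
  | [] => [[]]
  | c :: r => if c = '\n' then [] :: pvSplitNl r else (pvSplitNl r).modifyHead (c :: ·)

theorem pvSplitNl_ne_nil (l : List Char) : pvSplitNl l ≠ [] := by
  induction l with
  | nil => simp [pvSplitNl]
  | cons c r ih =>
      simp only [pvSplitNl]
      split_ifs
      · simp
      · cases h : pvSplitNl r with
        | nil => exact absurd h ih
        | cons y ys => simp [List.modifyHead]

theorem pv_go_eq (fuel : Nat) (l cur : List Char) (acc : List (List Char))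
    (h : l.length < fuel) :
    PySem.Chars.splitOn.go ['\n'] fuel l cur acc
      = acc.reverse ++ (pvSplitNl l).modifyHead (cur.reverse ++ ·) := by
  induction fuel generalizing l cur acc with
  | zero => omega
  | succ fuel ih =>
      cases l with
      | nil => simp [PySem.Chars.splitOn.go, pvSplitNl]
      | cons c r =>
          by_cases hc : c = '\n'
          · subst hc
            have : List.isPrefixOf ['\n'] ('\n' :: r) = true := by simp [List.isPrefixOf]
            rw [PySem.Chars.splitOn.go]
            simp only [this, if_pos]
            rw [ih _ _ _ (by simpa using h)]
            simp only [pvSplitNl, List.reverse_cons, List.reverse_nil, List.nil_append]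
            cases hs : pvSplitNl r <;> simp [List.modifyHead, hs]
          · have hp : List.isPrefixOf ['\n'] (c :: r) = false := by
              simp [List.isPrefixOf]
              intro h'; exact absurd h'.symm hc
            rw [PySem.Chars.splitOn.go]
            simp only [hp]
            rw [if_neg (by simp)]
            rw [ih _ _ _ (by simpa using Nat.lt_of_succ_lt_succ h)]
            simp only [pvSplitNl, if_neg hc]
            cases hs : pvSplitNl r with
            | nil => exact absurd hs (pvSplitNl_ne_nil r)
            | cons y ys => simp [List.modifyHead]

theorem pv_splitOn_eq (l : List Char) :
    PySem.Chars.splitOn l ['\n'] = pvSplitNl l := by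
  rw [PySem.Chars.splitOn, pv_go_eq _ _ _ _ (Nat.lt_succ_self _)]
  cases hs : pvSplitNl l with
  | nil => exact absurd hs (pvSplitNl_ne_nil l)
  | cons y ys => simp [List.modifyHead]

theorem pv_join_splitNl (l : List Char) :
    PySem.Chars.join ['\n'] (pvSplitNl l) = l := by
  induction l with
  | nil => simp [pvSplitNl, PySem.Chars.join_singleton]
  | cons c r ih =>
      by_cases hc : c = '\n'
      · subst hc
        simp only [pvSplitNl]
        cases hs : pvSplitNl r with
        | nil => exact absurd hs (pvSplitNl_ne_nil r)
        | cons y ys =>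
            rw [hs] at ih
            simp [PySem.Chars.join_cons_cons, ← ih]
      · simp only [pvSplitNl, if_neg hc]
        cases hs : pvSplitNl r with
        | nil => exact absurd hs (pvSplitNl_ne_nil r)
        | cons y ys =>
            rw [hs] at ih
            cases ys with
            | nil => simpa [List.modifyHead, PySem.Chars.join_singleton,
                PySem.Chars.join_singleton] using congrArg (c :: ·) ih
            | cons z zs =>
                simp [List.modifyHead, PySem.Chars.join_cons_cons] at ih ⊢
                simp [ih]

theorem pv_splitNl_eq_part (l : List Char) :
    pvSplitNl l = (pvPartNl l).1 ::
      (if '\n' ∈ l then pvSplitNl (pvPartNl l).2 else []) := by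
  induction l with
  | nil => simp [pvSplitNl, pvPartNl]
  | cons c r ih =>
      by_cases hc : c = '\n'
      · subst hc; simp [pvSplitNl, pvPartNl]
      · simp only [pvSplitNl, pvPartNl, if_neg hc]
        rw [ih]
        simp [List.modifyHead, List.mem_cons, Ne.symm hc]

theorem pv_part_of_not_mem (l : List Char) (h : '\n' ∉ l) : pvPartNl l = (l, []) := by
  induction l with
  | nil => simp [pvPartNl]
  | cons c r ih =>
      simp only [List.mem_cons, not_or] at h
      simp [pvPartNl, Ne.symm h.1, ih h.2]

theorem pv_strip_cons_ne_nil (c : Char) (x : List Char) (h : PySem.Chars.isspace c = false) :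
    PySem.Chars.strip (c :: x) ≠ [] := by
  simp only [PySem.Chars.strip, PySem.Chars.lstrip, PySem.Chars.rstrip, List.dropWhile_cons, h,
    Bool.false_eq_true, if_false]
  intro hemp
  rw [List.reverse_eq_nil_iff, List.dropWhile_eq_nil_iff] at hemp
  have := hemp c (by simp)
  simp [h] at this

theorem pv_strip_head_not_space (s : List Char) (c : Char) (x : List Char)
    (h : PySem.Chars.strip s = c :: x) : PySem.Chars.isspace c = false := by
  have hpre : PySem.Chars.strip s <+: PySem.Chars.lstrip s := by
    simp only [PySem.Chars.strip, PySem.Chars.rstrip]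
    have h1 := List.dropWhile_suffix (l := (PySem.Chars.lstrip s).reverse) PySem.Chars.isspace
    have h2 := List.reverse_prefix.mpr h1
    simpa using h2
  have hne : PySem.Chars.lstrip s ≠ [] := by
    intro hnil; rw [hnil] at hpre
    have := List.prefix_nil.mp hpre; simp [h] at this
  have hhd := List.IsPrefix.head hpre (by simp [h])
  have hd2 : (PySem.Chars.strip s).head (by simp [h]) = c := by simp [h]
  rw [hd2] at hhd
  have := List.head_dropWhile_not PySem.Chars.isspace
    (l := s) (by simpa [PySem.Chars.lstrip] using hne)
  rw [hhd]
  exact this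

-- ===== VERDICT (by name: the statement is the Claim_ definition above) =====
theorem extract_headline_and_content_py_spec : Claim_equal_extract_headline_and_content_py := by
  intro s _
  unfold Spec_extract_headline_and_content_py
  unfold extract_headline_and_content_py extract_headline_and_content_py_alt
  rw [pv_splitOn_eq]
  cases ht : PySem.Chars.strip s.toList with
  | nil =>
      simp [pvSplitNl, pvFindHeadA]
      decide
  | cons c x =>
      have hc : PySem.Chars.isspace c = false := pv_strip_head_not_space s.toList c x ht
      have hcn : c ≠ '\n' := by
        intro he; rw [he] at hc; simp [PySem.Chars.isspace] at hc
      have hp1 : (pvPartNl (c :: x)).1 = c :: (pvPartNl x).1 := by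
        simp [pvPartNl, hcn]
      rw [pv_splitNl_eq_part]
      have hstrip : PySem.Chars.strip (pvPartNl (c :: x)).1 ≠ [] := by
        rw [hp1]; exact pv_strip_cons_ne_nil c _ hc
      by_cases hmem : '\n' ∈ (c :: x)
      · simp only [if_pos hmem, pvFindHeadA, if_pos hstrip]
        simp [pv_join_splitNl]
      · have hpt := pv_part_of_not_mem _ hmem
        simp only [if_neg hmem, pvFindHeadA, if_pos hstrip]
        simp [hpt, PySem.Chars.join_nil]
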